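-- pv_equiv track=rewrite | github.com/RideGreg/LeetCode | Python/replace-the-substring-for-balanced-string.py | balancedString_ming
-- ===== SOURCE A (Python) =====
-- def balancedString_ming(s: str) -> int:
--     def ok(length):
--         for i in range(sz+1-length):
--             # char counts of substring s[i:i+length+1], faster using pre-computed counts
--             delta = [a-b for a,b in zip(char_counts[i+length], char_counts[i])]
--             # cover all which need replacement
--             if all(a-b >= 0 for a,b in zip(delta, to_replace)):
--                 return True
--         return False
--
--     char_counts = [[0,0,0,0]]
--     for c in s:
--         q,w,e,r = char_counts[-1]
--         if c == 'Q': q += 1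
--         elif c == 'W': w += 1
--         elif c == 'E': e += 1
--         else: r += 1
--         char_counts.append([q,w,e,r])
--         ''' KENG: all items in list points to the same memory
--         char_counts.append(char_counts[-1])
--         char_counts[-1][pos[c]] += 1
--         '''
--
--     sz = len(s)
--     to_replace = [max(0, x - sz//4) for x in char_counts[-1]]
--     hi, lo = sz, sum(to_replace)
--
--     if lo <= 1: return lo # no need to consider whether all to_replace is in a substring
--     while lo < hi:
--         mi = (lo+hi) // 2
--         if ok(mi):
--             hi = mi
--         else:
--             lo = mi + 1
--     return lo
-- ===== SOURCE B (Python) =====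
-- def balancedString_ming(s: str) -> int:
--     # sliding window instead of binary search over window length
--     n = len(s)
--     k = n // 4
--
--     def cls(c):
--         if c == 'Q': return 0
--         if c == 'W': return 1
--         if c == 'E': return 2
--         return 3
--
--     cnt = [0, 0, 0, 0]
--     for c in s:
--         cnt[cls(c)] += 1
--     need = [x - k if x > k else 0 for x in cnt]
--     if sum(need) == 0:
--         return 0
--     have = [0, 0, 0, 0]
--     best = n
--     lo = 0
--     for hi, c in enumerate(s):
--         have[cls(c)] += 1
--         while lo <= hi and all(h >= d for h, d in zip(have, need)):
--             if hi - lo + 1 < best: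
--                 best = hi - lo + 1
--             have[cls(s[lo])] -= 1
--             lo += 1
--     return best
-- ===== Notes on version B (the rewrite author's own statement) =====
-- stated objective: alternative
-- what changed: Replaced the binary search over candidate window lengths (each probe scanning all windows via a precomputed prefix-count table) by a single-pass two-pointer sliding window that directly finds the shortest substring covering the excess character counts.
import Mathlib
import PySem

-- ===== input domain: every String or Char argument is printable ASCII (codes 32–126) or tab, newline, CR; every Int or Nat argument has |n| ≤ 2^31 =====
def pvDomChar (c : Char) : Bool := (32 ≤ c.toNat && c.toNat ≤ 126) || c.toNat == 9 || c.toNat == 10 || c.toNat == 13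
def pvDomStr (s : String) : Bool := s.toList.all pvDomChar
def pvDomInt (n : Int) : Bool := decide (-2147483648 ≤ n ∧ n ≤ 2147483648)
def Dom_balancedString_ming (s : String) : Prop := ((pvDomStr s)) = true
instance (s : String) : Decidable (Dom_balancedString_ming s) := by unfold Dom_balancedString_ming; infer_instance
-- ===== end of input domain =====

-- B replaces A's binary search over window lengths by a two-pointer sliding window; the return values are proved identical on every string.

-- ===== PORT A =====
-- char-count update for one character (the if/elif chain of A's loop body)
def pvCCstep (t : Int × Int × Int × Int) (c : Char) : Int × Int × Int × Int :=
  if c = 'Q' then (t.1 + 1, t.2.1, t.2.2.1, t.2.2.2)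
  else if c = 'W' then (t.1, t.2.1 + 1, t.2.2.1, t.2.2.2)
  else if c = 'E' then (t.1, t.2.1, t.2.2.1 + 1, t.2.2.2)
  else (t.1, t.2.1, t.2.2.1, t.2.2.2 + 1)

-- the char_counts prefix-count table (A appends to a list that starts at [[0,0,0,0]])
def pvCC (cs : List Char) : List (Int × Int × Int × Int) :=
  cs.foldl (fun cc c => cc ++ [pvCCstep (cc.getLastD (0, 0, 0, 0)) c]) [(0, 0, 0, 0)]

-- A's helper ok(length); indices i and i+length are always in range in Python, so pyGetD's default is never read
def pvOk (cc : List (Int × Int × Int × Int)) (toRep : Int × Int × Int × Int) (sz L : Int) : Bool :=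
  (PySem.List.pyRange 0 (sz + 1 - L)).any fun i =>
    let a := PySem.List.pyGetD cc (i + L) (0, 0, 0, 0)
    let b := PySem.List.pyGetD cc i (0, 0, 0, 0)
    decide (toRep.1 ≤ a.1 - b.1 ∧ toRep.2.1 ≤ a.2.1 - b.2.1 ∧
            toRep.2.2.1 ≤ a.2.2.1 - b.2.2.1 ∧ toRep.2.2.2 ≤ a.2.2.2 - b.2.2.2)

-- A's 'while lo < hi' binary search
def pvBS (cc : List (Int × Int × Int × Int)) (toRep : Int × Int × Int × Int) (sz lo hi : Int) : Int :=
  if h : lo < hi then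
    let mi := PySem.Int.floordiv (lo + hi) 2
    if pvOk cc toRep sz mi then pvBS cc toRep sz lo mi else pvBS cc toRep sz (mi + 1) hi
  else lo
termination_by (hi - lo).toNat
decreasing_by
  · have h1 := (PySem.Int.le_floordiv_iff_mul_le (a := lo + hi) (b := 2) (q := lo) (by omega)).mpr (by omega)
    have h2 := (PySem.Int.floordiv_lt_iff_lt_mul (a := lo + hi) (b := 2) (q := hi) (by omega)).mpr (by omega)
    omega
  · have h1 := (PySem.Int.le_floordiv_iff_mul_le (a := lo + hi) (b := 2) (q := lo) (by omega)).mpr (by omega)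
    have h2 := (PySem.Int.floordiv_lt_iff_lt_mul (a := lo + hi) (b := 2) (q := hi) (by omega)).mpr (by omega)
    omega

def balancedString_ming (s : String) : Int :=
  let cc := pvCC s.toList
  let sz := PySem.Str.len s
  let last := cc.getLastD (0, 0, 0, 0)
  let q4 := PySem.Int.floordiv sz 4
  let toRep : Int × Int × Int × Int :=
    (max 0 (last.1 - q4), max 0 (last.2.1 - q4), max 0 (last.2.2.1 - q4), max 0 (last.2.2.2 - q4))
  let lo := toRep.1 + toRep.2.1 + toRep.2.2.1 + toRep.2.2.2
  if lo ≤ 1 then lo else pvBS cc toRep sz lo sz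

-- ===== PORT B =====
-- Source B's cls(c)
def pvCls (c : Char) : Nat :=
  if c = 'Q' then 0 else if c = 'W' then 1 else if c = 'E' then 2 else 3

-- Source B's 'xs[j] += d' on a 4-entry count list
def pvBump (t : Int × Int × Int × Int) (j : Nat) (d : Int) : Int × Int × Int × Int :=
  if j = 0 then (t.1 + d, t.2.1, t.2.2.1, t.2.2.2)
  else if j = 1 then (t.1, t.2.1 + d, t.2.2.1, t.2.2.2)
  else if j = 2 then (t.1, t.2.1, t.2.2.1 + d, t.2.2.2)
  else (t.1, t.2.1, t.2.2.1, t.2.2.2 + d)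

-- all(h >= d for h, d in zip(have, need))
def pvCovers (hv nd : Int × Int × Int × Int) : Bool :=
  decide (nd.1 ≤ hv.1 ∧ nd.2.1 ≤ hv.2.1 ∧ nd.2.2.1 ≤ hv.2.2.1 ∧ nd.2.2.2 ≤ hv.2.2.2)

-- Source B's inner while loop; s[lo] is always in range in Python, so pyGetD's default is never read
def pvShrink (cs : List Char) (nd : Int × Int × Int × Int) (hi : Int)
    (hv : Int × Int × Int × Int) (best lo : Int) : (Int × Int × Int × Int) × Int × Int :=
  if h : lo ≤ hi ∧ pvCovers hv nd then
    pvShrink cs nd hi (pvBump hv (pvCls (PySem.List.pyGetD cs lo ' ')) (-1))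
      (if hi - lo + 1 < best then hi - lo + 1 else best) (lo + 1)
  else (hv, best, lo)
termination_by (hi + 1 - lo).toNat
decreasing_by omega

def balancedString_ming_alt (s : String) : Int :=
  let cs := s.toList
  let n := PySem.Str.len s
  let k := PySem.Int.floordiv n 4
  let cnt := cs.foldl (fun t c => pvBump t (pvCls c) 1) (0, 0, 0, 0)
  let nd : Int × Int × Int × Int :=
    (if cnt.1 > k then cnt.1 - k else 0, if cnt.2.1 > k then cnt.2.1 - k else 0,
     if cnt.2.2.1 > k then cnt.2.2.1 - k else 0, if cnt.2.2.2 > k then cnt.2.2.2 - k else 0)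
  if nd.1 + nd.2.1 + nd.2.2.1 + nd.2.2.2 = 0 then 0
  else
    let st := (PySem.List.enumerate cs).foldl
      (fun st p =>
        let hv := pvBump st.1 (pvCls p.2) 1
        pvShrink cs nd p.1 hv st.2.1 st.2.2)
      ((0, 0, 0, 0), n, 0)
    st.2.1

-- ===== PRECONDITION & SPEC =====
def Spec_balancedString_ming (s : String) (out : Int) : Prop := out = balancedString_ming_alt s
instance (s : String) (out : Int) : Decidable (Spec_balancedString_ming s out) := by unfold Spec_balancedString_ming; infer_instance

-- ===== CLAIM (what is proved, stated in full; the proofs are below) =====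
def Claim_equal_balancedString_ming : Prop := ∀ (s : String), Dom_balancedString_ming s → Spec_balancedString_ming s (balancedString_ming s)

-- ===== LEMMAS AND PROOFS =====

-- mathematical layer: prefix class counts, required excess, coverable windows
def cntf (cs : List Char) (j : Nat) : Nat := cs.countP (fun c => pvCls c == j)

def needN (cs : List Char) (j : Nat) : Nat := cntf cs j - cs.length / 4

def sumNeed (cs : List Char) : Nat := needN cs 0 + needN cs 1 + needN cs 2 + needN cs 3

def needI (cs : List Char) : Int × Int × Int × Int :=
  ((needN cs 0 : Int), (needN cs 1 : Int), (needN cs 2 : Int), (needN cs 3 : Int))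

def cntI (cs : List Char) (i : Nat) : Int × Int × Int × Int :=
  ((cntf (cs.take i) 0 : Int), (cntf (cs.take i) 1 : Int),
   (cntf (cs.take i) 2 : Int), (cntf (cs.take i) 3 : Int))

def diffI (cs : List Char) (lo p : Nat) : Int × Int × Int × Int :=
  ((cntI cs p).1 - (cntI cs lo).1, (cntI cs p).2.1 - (cntI cs lo).2.1,
   (cntI cs p).2.2.1 - (cntI cs lo).2.2.1, (cntI cs p).2.2.2 - (cntI cs lo).2.2.2)

-- the window [l, h) of cs covers the excess counts
def Good (cs : List Char) (l h : Nat) : Prop :=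
  needN cs 0 + cntf (cs.take l) 0 ≤ cntf (cs.take h) 0 ∧
  needN cs 1 + cntf (cs.take l) 1 ≤ cntf (cs.take h) 1 ∧
  needN cs 2 + cntf (cs.take l) 2 ≤ cntf (cs.take h) 2 ∧
  needN cs 3 + cntf (cs.take l) 3 ≤ cntf (cs.take h) 3

def okP (cs : List Char) (L : Nat) : Prop :=
  ∃ i ≤ cs.length, i + L ≤ cs.length ∧ Good cs i (i + L)

lemma ok_top (cs : List Char) : okP cs cs.length := by
  refine ⟨0, by omega, by omega, ?_, ?_, ?_, ?_⟩ <;>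
    · rw [Nat.zero_add, List.take_length, List.take_zero]
      simpa [cntf, needN] using Nat.sub_le (cntf cs _) (cs.length / 4)

-- the least coverable window length; both programs return it
noncomputable def mval (cs : List Char) : Nat := sInf {L | okP cs L}

lemma cnt_take_le {cs : List Char} {l h j : Nat} (hlh : l ≤ h) :
    cntf (cs.take l) j ≤ cntf (cs.take h) j := by
  have he : cs.take l = (cs.take h).take l := by rw [List.take_take, Nat.min_eq_left hlh]
  rw [cntf, cntf, he]
  exact (List.take_sublist _ _).countP_le

lemma cnt_take_succ (cs : List Char) (p j : Nat) (hp : p < cs.length) :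
    cntf (cs.take (p + 1)) j = cntf (cs.take p) j + (if pvCls cs[p] = j then 1 else 0) := by
  rw [cntf, cntf, List.take_succ_eq_append_getElem hp, List.countP_append]
  simp [List.countP_cons, beq_iff_eq]

lemma cls_cases (c : Char) : pvCls c = 0 ∨ pvCls c = 1 ∨ pvCls c = 2 ∨ pvCls c = 3 := by
  unfold pvCls; split_ifs <;> simp

lemma cnt4 (xs : List Char) : cntf xs 0 + cntf xs 1 + cntf xs 2 + cntf xs 3 = xs.length := by
  induction xs with
  | nil => simp [cntf]
  | cons c xs ih =>
    simp only [cntf, List.countP_cons, List.length_cons] at *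
    rcases cls_cases c with h | h | h | h <;> simp [h] <;> omega

lemma good_mono {cs : List Char} {l' l h h' : Nat} (hl : l' ≤ l) (hh : h ≤ h')
    (hg : Good cs l h) : Good cs l' h' := by
  obtain ⟨g0, g1, g2, g3⟩ := hg
  refine ⟨?_, ?_, ?_, ?_⟩
  · have a := cnt_take_le (cs := cs) (j := 0) hl; have b := cnt_take_le (cs := cs) (j := 0) hh; omega
  · have a := cnt_take_le (cs := cs) (j := 1) hl; have b := cnt_take_le (cs := cs) (j := 1) hh; omega
  · have a := cnt_take_le (cs := cs) (j := 2) hl; have b := cnt_take_le (cs := cs) (j := 2) hh; omega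
  · have a := cnt_take_le (cs := cs) (j := 3) hl; have b := cnt_take_le (cs := cs) (j := 3) hh; omega

lemma not_good_diag {cs : List Char} (hsum : 1 ≤ sumNeed cs) (l : Nat) : ¬ Good cs l l := by
  intro ⟨g0, g1, g2, g3⟩
  unfold sumNeed at hsum; omega

lemma ok_succ {cs : List Char} {L : Nat} (h : okP cs L) (hL : L < cs.length) : okP cs (L + 1) := by
  obtain ⟨i, hi, hiL, g⟩ := h
  by_cases hc : i + L < cs.length
  · exact ⟨i, by omega, by omega, good_mono le_rfl (by omega) g⟩
  · refine ⟨i - 1, by omega, by omega, ?_⟩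
    have : i - 1 + (L + 1) = i + L := by omega
    rw [this]
    exact good_mono (by omega) le_rfl g

lemma ok_mono {cs : List Char} {L L' : Nat} (h : okP cs L) (hLL : L ≤ L') (hL' : L' ≤ cs.length) :
    okP cs L' := by
  induction L', hLL using Nat.le_induction with
  | base => exact h
  | succ m hm ih => exact ok_succ (ih (by omega)) (by omega)

lemma okP_len_ge {cs : List Char} {L : Nat} (h : okP cs L) : sumNeed cs ≤ L := by
  obtain ⟨i, hi, hiL, g0, g1, g2, g3⟩ := h
  have e1 := cnt4 (cs.take i)
  have e2 := cnt4 (cs.take (i + L))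
  rw [List.length_take, Nat.min_eq_left hi] at e1
  rw [List.length_take, Nat.min_eq_left hiL] at e2
  unfold sumNeed; omega

lemma ok_mval (cs : List Char) : okP cs (mval cs) := by
  unfold mval
  have hne : Set.Nonempty {L | okP cs L} := ⟨cs.length, by simp only [Set.mem_setOf_eq]; exact ok_top cs⟩
  simpa using Nat.sInf_mem hne

lemma mval_le {cs : List Char} {L : Nat} (h : okP cs L) : mval cs ≤ L := by
  unfold mval; exact Nat.sInf_le (by simp only [Set.mem_setOf_eq]; exact h)

lemma mval_le_len (cs : List Char) : mval cs ≤ cs.length := mval_le (ok_top cs)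

lemma sum_le_mval (cs : List Char) : sumNeed cs ≤ mval cs := okP_len_ge (ok_mval cs)

lemma okP_one {cs : List Char} (j0 : Nat) (hj0 : needN cs j0 ≤ 1)
    (hoth : ∀ j, j ≠ j0 → needN cs j = 0) (hcnt : 1 ≤ cntf cs j0) : okP cs 1 := by
  obtain ⟨c, hc, hpc⟩ := List.countP_pos_iff.mp (by rwa [cntf] at hcnt)
  obtain ⟨p, hp, hpe⟩ := List.mem_iff_getElem.mp hc
  have hcl : pvCls cs[p] = j0 := by rw [hpe]; exact beq_iff_eq.mp hpc
  have comp : ∀ j, needN cs j + cntf (cs.take p) j ≤ cntf (cs.take (p + 1)) j := by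
    intro j
    have hstep := cnt_take_succ cs p j hp
    by_cases hjj : j = j0
    · subst hjj; rw [hstep, if_pos hcl]; omega
    · have := hoth j hjj; omega
  exact ⟨p, by omega, by omega, comp 0, comp 1, comp 2, comp 3⟩

lemma needN_of_ge {cs : List Char} {j : Nat} (h4 : 4 ≤ j) : needN cs j = 0 := by
  have : cntf cs j = 0 := by
    rw [cntf, List.countP_eq_zero]
    intro c hc
    rcases cls_cases c with h | h | h | h <;> simp [h] <;> omega
  unfold needN; omega

lemma mval_small {cs : List Char} (h : sumNeed cs ≤ 1) : mval cs = sumNeed cs := by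
  refine Nat.le_antisymm ?_ (sum_le_mval cs)
  rcases Nat.lt_or_ge (sumNeed cs) 1 with h0 | h1
  · have h0' : sumNeed cs = 0 := by omega
    have hok : okP cs 0 := by
      refine ⟨0, by omega, by omega, ?_, ?_, ?_, ?_⟩ <;>
        · simp only [Nat.add_zero, List.take_zero, cntf, List.countP_nil]
          unfold sumNeed at h0'; omega
    have := mval_le hok
    omega
  · have hs1 : sumNeed cs = 1 := by omega
    have hex : 1 ≤ needN cs 0 ∨ 1 ≤ needN cs 1 ∨ 1 ≤ needN cs 2 ∨ 1 ≤ needN cs 3 := by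
      unfold sumNeed at hs1; omega
    have main : ∀ j0, 1 ≤ needN cs j0 → mval cs ≤ 1 := by
      intro j0 hpos
      have hj04 : j0 < 4 := by
        by_contra hc
        have := needN_of_ge (cs := cs) (j := j0) (by omega)
        omega
      have hoth : ∀ j, j ≠ j0 → needN cs j = 0 := by
        intro j hj
        rcases Nat.lt_or_ge j 4 with hj4 | hj4
        · unfold sumNeed at hs1; interval_cases j0 <;> interval_cases j <;> omega
        · exact needN_of_ge hj4
      have hcnt : 1 ≤ cntf cs j0 := by unfold needN at hpos; omega
      exact mval_le (okP_one j0 (by unfold sumNeed at hs1; interval_cases j0 <;> omega) hoth hcnt)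
    have hle : mval cs ≤ 1 := by
      rcases hex with h | h | h | h
      · exact main 0 h
      · exact main 1 h
      · exact main 2 h
      · exact main 3 h
    omega

-- ===== A-side lemmas =====
lemma pvCC_append (cs : List Char) (c : Char) :
    pvCC (cs ++ [c]) = pvCC cs ++ [pvCCstep ((pvCC cs).getLastD (0, 0, 0, 0)) c] := by
  unfold pvCC
  rw [List.foldl_append]
  rfl

lemma ccstep_eq (cs : List Char) (c : Char) :
    pvCCstep (cntI cs cs.length) c = cntI (cs ++ [c]) (cs.length + 1) := by
  have h1 : (cs ++ [c]).take (cs.length + 1) = cs ++ [c] :=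
    List.take_of_length_le (by simp)
  have hs : ∀ j, List.countP (fun c' => pvCls c' == j) (cs ++ [c]) =
      List.countP (fun c' => pvCls c' == j) cs + (if pvCls c = j then 1 else 0) := by
    intro j
    rw [List.countP_append]
    simp [List.countP_cons, beq_iff_eq]
  unfold pvCCstep cntI cntf
  rw [h1, List.take_length]
  split_ifs with hq hw he
  · have h0 : pvCls c = 0 := by simp [pvCls, hq]
    rw [hs 0, hs 1, hs 2, hs 3, h0]
    simp [Prod.ext_iff]
    all_goals omega
  · have h0 : pvCls c = 1 := by simp [pvCls, hq, hw]
    rw [hs 0, hs 1, hs 2, hs 3, h0]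
    simp [Prod.ext_iff]
    all_goals omega
  · have h0 : pvCls c = 2 := by simp [pvCls, hq, hw, he]
    rw [hs 0, hs 1, hs 2, hs 3, h0]
    simp [Prod.ext_iff]
    all_goals omega
  · have h0 : pvCls c = 3 := by simp [pvCls, hq, hw, he]
    rw [hs 0, hs 1, hs 2, hs 3, h0]
    simp [Prod.ext_iff]
    all_goals omega

lemma pvCC_eq (cs : List Char) : pvCC cs = (List.range (cs.length + 1)).map (cntI cs) := by
  induction cs using List.reverseRecOn with
  | nil => simp [pvCC, cntI, cntf, List.range_succ]
  | append_singleton cs c ih =>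
    rw [pvCC_append, ih]
    have hlast : ((List.range (cs.length + 1)).map (cntI cs)).getLastD (0, 0, 0, 0) =
        cntI cs cs.length := by
      simp [List.range_succ, List.getLastD_concat]
    rw [hlast, ccstep_eq]
    rw [List.length_append, List.length_singleton, List.range_succ (n := cs.length + 1),
      List.map_append]
    have hcong : (List.range (cs.length + 1)).map (cntI cs) =
        (List.range (cs.length + 1)).map (cntI (cs ++ [c])) := by
      apply List.map_congr_left
      intro i hi
      rw [List.mem_range] at hi
      unfold cntI
      rw [List.take_append_of_le_length (by omega)]
    rw [hcong]
    rfl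

lemma pvCC_last (cs : List Char) :
    (pvCC cs).getLastD (0, 0, 0, 0) = cntI cs cs.length := by
  rw [pvCC_eq]
  simp [List.range_succ, List.getLastD_concat]

lemma pvCC_getD (cs : List Char) (i : Nat) (hi : i ≤ cs.length) :
    PySem.List.pyGetD (pvCC cs) ((i : Nat) : Int) (0, 0, 0, 0) = cntI cs i := by
  rw [PySem.List.pyGetD_natCast, pvCC_eq, PySem.List.getD_map_range _ _ _ _ (by omega)]

lemma pvOk_iff (cs : List Char) (L : Int) (hL0 : 0 ≤ L) (hLn : L ≤ (cs.length : Int)) :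
    (pvOk (pvCC cs) (needI cs) (cs.length : Int) L = true) ↔ okP cs L.toNat := by
  unfold pvOk
  rw [List.any_eq_true]
  constructor
  · rintro ⟨i, hmem, hcond⟩
    rw [PySem.List.mem_pyRange_one] at hmem
    obtain ⟨h0i, hilt⟩ := hmem
    simp only [decide_eq_true_eq] at hcond
    have hi1 : i + L = ((i.toNat + L.toNat : Nat) : Int) := by omega
    have hi2 : i = ((i.toNat : Nat) : Int) := by omega
    rw [hi1, hi2, pvCC_getD _ _ (by omega), pvCC_getD _ _ (by omega)] at hcond
    simp only [needI, cntI, Int.toNat_natCast] at hcond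
    refine ⟨i.toNat, by omega, by omega, ?_, ?_, ?_, ?_⟩ <;> omega
  · rintro ⟨iN, hiN, hiL, g0, g1, g2, g3⟩
    refine ⟨(iN : Int), ?_, ?_⟩
    · rw [PySem.List.mem_pyRange_one]; omega
    · simp only [decide_eq_true_eq]
      have hcast : (iN : Int) + L = ((iN + L.toNat : Nat) : Int) := by omega
      rw [hcast, pvCC_getD _ _ (by omega), pvCC_getD _ _ hiN]
      simp only [needI, cntI]
      omega

lemma pvBS_eq (cs : List Char) :
    ∀ (k : Nat) (lo hi : Int), (hi - lo).toNat ≤ k → 0 ≤ lo → lo ≤ (mval cs : Int) →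
      (mval cs : Int) ≤ hi → hi ≤ (cs.length : Int) →
      pvBS (pvCC cs) (needI cs) (cs.length : Int) lo hi = (mval cs : Int) := by
  intro k
  induction k with
  | zero =>
    intro lo hi hk h0 h1 h2 h3
    rw [pvBS, dif_neg (by omega)]
    omega
  | succ k ih =>
    intro lo hi hk h0 h1 h2 h3
    rw [pvBS]
    by_cases hlt : lo < hi
    · rw [dif_pos hlt]
      have hmlo : lo ≤ PySem.Int.floordiv (lo + hi) 2 :=
        (PySem.Int.le_floordiv_iff_mul_le (by omega)).mpr (by omega)
      have hmhi : PySem.Int.floordiv (lo + hi) 2 < hi :=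
        (PySem.Int.floordiv_lt_iff_lt_mul (by omega)).mpr (by omega)
      by_cases hok : okP cs (PySem.Int.floordiv (lo + hi) 2).toNat
      · rw [if_pos ((pvOk_iff cs _ (by omega) (by omega)).mpr hok)]
        have hle : (mval cs : Int) ≤ PySem.Int.floordiv (lo + hi) 2 := by
          have := mval_le hok; omega
        exact ih lo _ (by omega) h0 h1 hle (by omega)
      · rw [if_neg (fun hc => hok ((pvOk_iff cs _ (by omega) (by omega)).mp hc))]
        have hlt2 : PySem.Int.floordiv (lo + hi) 2 < (mval cs : Int) := by
          by_contra hge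
          exact hok (ok_mono (ok_mval cs) (by omega) (by omega))
        exact ih _ hi (by omega) (by omega) (by omega) h2 h3
    · rw [dif_neg hlt]; omega

lemma A_eq (s : String) : balancedString_ming s = (mval s.toList : Int) := by
  simp only [balancedString_ming, PySem.Str.len_eq, pvCC_last, cntI, List.take_length]
  have hq4 : PySem.Int.floordiv ((s.toList.length : Nat) : Int) 4 = ((s.toList.length / 4 : Nat) : Int) := by
    simpa using PySem.Int.floordiv_natCast s.toList.length 4
  rw [hq4]
  have hmax : ∀ j, max 0 ((cntf s.toList j : Int) - ((s.toList.length / 4 : Nat) : Int)) =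
      ((needN s.toList j : Nat) : Int) := by
    intro j; unfold needN; omega
  rw [hmax 0, hmax 1, hmax 2, hmax 3]
  have hsum : ((needN s.toList 0 : Nat) : Int) + ((needN s.toList 1 : Nat) : Int) +
      ((needN s.toList 2 : Nat) : Int) + ((needN s.toList 3 : Nat) : Int) =
      ((sumNeed s.toList : Nat) : Int) := by
    unfold sumNeed; push_cast; ring
  rw [hsum]
  split_ifs with hif
  · have hs : sumNeed s.toList ≤ 1 := by exact_mod_cast hif
    rw [mval_small hs]
  · have hs2 : 2 ≤ sumNeed s.toList := by omega
    exact pvBS_eq s.toList ((s.toList.length : Int) - (sumNeed s.toList : Int)).toNat _ _ le_rfl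
      (by omega) (by exact_mod_cast sum_le_mval s.toList) (by exact_mod_cast mval_le_len s.toList)
      le_rfl

-- ===== B-side lemmas =====
lemma covers_iff (cs : List Char) (lo p : Nat) :
    (pvCovers (diffI cs lo p) (needI cs) = true) ↔ Good cs lo p := by
  simp only [pvCovers, diffI, needI, cntI, Good, decide_eq_true_eq]
  omega

lemma pyget_char (cs : List Char) (lo : Nat) (hlo : lo < cs.length) :
    PySem.List.pyGetD cs ((lo : Nat) : Int) ' ' = cs[lo] := by
  rw [PySem.List.pyGetD_natCast]
  exact List.getD_eq_getElem cs ' ' hlo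

lemma bump_right (cs : List Char) (lo p : Nat) (hp : p < cs.length) :
    pvBump (diffI cs lo p) (pvCls cs[p]) 1 = diffI cs lo (p + 1) := by
  have h0 := cnt_take_succ cs p 0 hp
  have h1 := cnt_take_succ cs p 1 hp
  have h2 := cnt_take_succ cs p 2 hp
  have h3 := cnt_take_succ cs p 3 hp
  unfold pvBump diffI cntI
  rcases cls_cases cs[p] with h | h | h | h <;>
    (simp [h, Prod.ext_iff] at h0 h1 h2 h3 ⊢) <;> omega

lemma bump_left (cs : List Char) (lo h : Nat) (hlo : lo < cs.length) :
    pvBump (diffI cs lo h) (pvCls cs[lo]) (-1) = diffI cs (lo + 1) h := by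
  have h0 := cnt_take_succ cs lo 0 hlo
  have h1 := cnt_take_succ cs lo 1 hlo
  have h2 := cnt_take_succ cs lo 2 hlo
  have h3 := cnt_take_succ cs lo 3 hlo
  unfold pvBump diffI cntI
  rcases cls_cases cs[lo] with h | h | h | h <;>
    (simp [h, Prod.ext_iff] at h0 h1 h2 h3 ⊢) <;> omega

lemma shrink_spec (cs : List Char) (hsum : 1 ≤ sumNeed cs) (p : Nat) (hp : p < cs.length) :
    ∀ (k lo : Nat) (best : Int), p + 1 - lo ≤ k → lo ≤ p + 1 →
    ∃ (lo' : Nat) (best' : Int),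
      pvShrink cs (needI cs) (p : Int) (diffI cs lo (p + 1)) best ((lo : Nat) : Int) =
        (diffI cs lo' (p + 1), best', ((lo' : Nat) : Int)) ∧
      lo ≤ lo' ∧ lo' ≤ p + 1 ∧ ¬ Good cs lo' (p + 1) ∧ best' ≤ best ∧
      (∀ l : Nat, lo ≤ l → l < lo' → Good cs l (p + 1) ∧ best' ≤ (p : Int) + 1 - (l : Int)) ∧
      (best' = best ∨ ∃ l : Nat, lo ≤ l ∧ l < lo' ∧ best' = (p : Int) + 1 - (l : Int)) := by
  intro k
  induction k with
  | zero =>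
    intro lo best hk hlo
    have hlo' : lo = p + 1 := by omega
    rw [pvShrink, dif_neg (by rintro ⟨hc, -⟩; omega)]
    refine ⟨lo, best, rfl, le_rfl, by omega, ?_, le_rfl, fun l h1 h2 => absurd h2 (by omega),
      Or.inl rfl⟩
    subst hlo'
    exact not_good_diag hsum _
  | succ k ih =>
    intro lo best hk hlo
    rw [pvShrink]
    by_cases hcond : ((lo : Nat) : Int) ≤ (p : Int) ∧
        pvCovers (diffI cs lo (p + 1)) (needI cs) = true
    · rw [dif_pos hcond]
      obtain ⟨hlop, hcov⟩ := hcond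
      have hlop' : lo ≤ p := by exact_mod_cast hlop
      have hgood : Good cs lo (p + 1) := (covers_iff _ _ _).mp hcov
      rw [pyget_char cs lo (by omega), bump_left cs lo (p + 1) (by omega)]
      have hcast : ((lo : Nat) : Int) + 1 = (((lo + 1 : Nat) : Nat) : Int) := by push_cast; ring
      rw [hcast]
      obtain ⟨lo', best', heq, hge, hle, hng, hbb, hall, hreach⟩ :=
        ih (lo + 1) (if (p : Int) - lo + 1 < best then (p : Int) - lo + 1 else best)
          (by omega) (by omega)
      refine ⟨lo', best', heq, by omega, hle, hng, ?_, ?_, ?_⟩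
      · split_ifs at hbb <;> omega
      · intro l hl1 hl2
        rcases Nat.eq_or_lt_of_le hl1 with rfl | hlt
        · exact ⟨hgood, by split_ifs at hbb <;> omega⟩
        · exact hall l (by omega) hl2
      · rcases hreach with he | ⟨l, hl1, hl2, he⟩
        · split_ifs at he with hsp
          · exact Or.inr ⟨lo, le_rfl, by omega, by omega⟩
          · exact Or.inl he
        · exact Or.inr ⟨l, by omega, hl2, he⟩
    · rw [dif_neg hcond]
      refine ⟨lo, best, rfl, le_rfl, hlo, ?_, le_rfl, fun l h1 h2 => absurd h2 (by omega),
        Or.inl rfl⟩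
      by_cases hlop : lo ≤ p
      · intro hg
        exact hcond ⟨by exact_mod_cast hlop, (covers_iff _ _ _).mpr hg⟩
      · have : lo = p + 1 := by omega
        subst this
        exact not_good_diag hsum _

-- the sliding-window loop invariant after processing the first p characters
def InvB (cs : List Char) (p : Nat) (st : (Int × Int × Int × Int) × Int × Int) : Prop :=
  ∃ lo : Nat, st.2.2 = ((lo : Nat) : Int) ∧ lo ≤ p ∧ st.1 = diffI cs lo p ∧ ¬ Good cs lo p ∧
    (∀ l h : Nat, l ≤ h → h ≤ p → Good cs l h → st.2.1 ≤ (h : Int) - (l : Int)) ∧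
    (∀ l : Nat, l < lo → ∃ h : Nat, l ≤ h ∧ h ≤ p ∧ Good cs l h ∧ st.2.1 ≤ (h : Int) - (l : Int)) ∧
    (st.2.1 = (cs.length : Int) ∨
      ∃ l h : Nat, l ≤ h ∧ h ≤ p ∧ Good cs l h ∧ st.2.1 = (h : Int) - (l : Int))

lemma InvB_intro (cs : List Char) (p : Nat) (hv : Int × Int × Int × Int) (best loI : Int)
    (lo : Nat) (e1 : loI = ((lo : Nat) : Int)) (e2 : lo ≤ p) (e3 : hv = diffI cs lo p)
    (e4 : ¬ Good cs lo p)
    (e5 : ∀ l h : Nat, l ≤ h → h ≤ p → Good cs l h → best ≤ (h : Int) - (l : Int))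
    (e6 : ∀ l : Nat, l < lo → ∃ h : Nat, l ≤ h ∧ h ≤ p ∧ Good cs l h ∧ best ≤ (h : Int) - (l : Int))
    (e7 : best = (cs.length : Int) ∨
      ∃ l h : Nat, l ≤ h ∧ h ≤ p ∧ Good cs l h ∧ best = (h : Int) - (l : Int)) :
    InvB cs p (hv, best, loI) := ⟨lo, e1, e2, e3, e4, e5, e6, e7⟩

lemma fold_inv (cs : List Char) (hsum : 1 ≤ sumNeed cs) :
    ∀ p, p ≤ cs.length →
      InvB cs p ((PySem.List.enumerate (cs.take p) 0).foldl
        (fun st q => pvShrink cs (needI cs) q.1 (pvBump st.1 (pvCls q.2) 1) st.2.1 st.2.2)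
        ((0, 0, 0, 0), (cs.length : Int), 0)) := by
  intro p
  induction p with
  | zero =>
    intro _
    simp only [List.take_zero, PySem.List.enumerate_nil, List.foldl_nil]
    refine ⟨0, by norm_num, le_rfl, by simp [diffI], not_good_diag hsum 0, ?_, ?_, Or.inl rfl⟩
    · intro l h hlh hh hg
      have hl0 : l = 0 := by omega
      have hh0 : h = 0 := by omega
      subst hl0; subst hh0
      exact absurd hg (not_good_diag hsum 0)
    · intro l hl
      exact absurd hl (by omega)
  | succ p ih =>
    intro hp1
    have hp : p < cs.length := by omega
    have htake : cs.take (p + 1) = cs.take p ++ [cs[p]] := List.take_succ_eq_append_getElem hp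
    have hlen : (cs.take p).length = p := by
      rw [List.length_take]; omega
    rw [htake, PySem.List.enumerate_append, List.foldl_append, hlen,
      PySem.List.enumerate_cons, PySem.List.enumerate_nil, List.foldl_cons, List.foldl_nil]
    obtain ⟨lo, hlo_eq, hlo_le, hhv, hng0, hA1, hI, hA2⟩ := ih (by omega)
    set st := (PySem.List.enumerate (cs.take p) 0).foldl
      (fun st q => pvShrink cs (needI cs) q.1 (pvBump st.1 (pvCls q.2) 1) st.2.1 st.2.2)
      ((0, 0, 0, 0), (cs.length : Int), 0) with hst
    rw [hlo_eq, hhv, bump_right cs lo p hp]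
    have hz : (0 : Int) + (p : Int) = ((p : Nat) : Int) := by push_cast; ring
    rw [hz]
    obtain ⟨lo', best', heq, hge, hle, hng, hbb, hall, hreach⟩ :=
      shrink_spec cs hsum p hp (p + 1 - lo) lo st.2.1 le_rfl (by omega)
    rw [heq]
    refine InvB_intro cs (p + 1) _ _ _ lo' rfl hle rfl hng ?_ ?_ ?_
    · intro l h hlh hh hg
      by_cases hhp' : h ≤ p
      · have := hA1 l h hlh hhp' hg
        omega
      · have hh1 : h = p + 1 := by omega
        subst hh1
        by_cases hll : l < lo
        · obtain ⟨h2, hl2, hh2, hg2, hb2⟩ := hI l hll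
          omega
        · by_cases hl2 : l < lo'
          · exact (hall l (by omega) hl2).2
          · exact absurd (good_mono (show lo' ≤ l by omega) le_rfl hg) hng
    · intro l hl
      by_cases hll : l < lo
      · obtain ⟨h2, hl2, hh2, hg2, hb2⟩ := hI l hll
        exact ⟨h2, hl2, by omega, hg2, by omega⟩
      · exact ⟨p + 1, by omega, le_rfl, (hall l (by omega) hl).1, (hall l (by omega) hl).2⟩
    · rcases hreach with he | ⟨l, hl1, hl2, he⟩
      · subst he
        rcases hA2 with hbn | ⟨l, h, hlh, hhn, hg, hbe⟩
        · exact Or.inl hbn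
        · exact Or.inr ⟨l, h, hlh, by omega, hg, hbe⟩
      · refine Or.inr ⟨l, p + 1, by omega, le_rfl, (hall l (by omega) hl2).1, by omega⟩

lemma cnt_fold_gen (cs : List Char) : ∀ t : Int × Int × Int × Int,
    cs.foldl (fun t c => pvBump t (pvCls c) 1) t =
    (t.1 + (cntf cs 0 : Int), t.2.1 + (cntf cs 1 : Int),
     t.2.2.1 + (cntf cs 2 : Int), t.2.2.2 + (cntf cs 3 : Int)) := by
  induction cs with
  | nil => intro t; simp [cntf]
  | cons c cs ih =>
    intro t
    rw [List.foldl_cons, ih]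
    have hc : ∀ j, cntf (c :: cs) j = (if pvCls c = j then 1 else 0) + cntf cs j := by
      intro j
      simp [cntf, List.countP_cons, beq_iff_eq]
      omega
    rw [hc 0, hc 1, hc 2, hc 3]
    rcases cls_cases c with h | h | h | h <;>
      (simp [pvBump, h, Prod.ext_iff]; push_cast) <;> omega

lemma B_eq (s : String) : balancedString_ming_alt s = (mval s.toList : Int) := by
  simp only [balancedString_ming_alt, PySem.Str.len_eq]
  rw [cnt_fold_gen]
  have hq4 : PySem.Int.floordiv ((s.toList.length : Nat) : Int) 4 =
      ((s.toList.length / 4 : Nat) : Int) := by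
    simpa using PySem.Int.floordiv_natCast s.toList.length 4
  rw [hq4]
  have hnd : ∀ j, (if (0 : Int) + (cntf s.toList j : Int) > ((s.toList.length / 4 : Nat) : Int)
      then (0 : Int) + (cntf s.toList j : Int) - ((s.toList.length / 4 : Nat) : Int) else 0) =
      ((needN s.toList j : Nat) : Int) := by
    intro j; unfold needN; split_ifs <;> omega
  simp only [hnd]
  rw [show ((((needN s.toList 0 : Nat) : Int), ((needN s.toList 1 : Nat) : Int),
    ((needN s.toList 2 : Nat) : Int), ((needN s.toList 3 : Nat) : Int)) :
      Int × Int × Int × Int) = needI s.toList from rfl]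
  split_ifs with hif
  · have hz : sumNeed s.toList = 0 := by unfold sumNeed; omega
    rw [mval_small (by omega), hz]
    norm_num
  · have hsum : 1 ≤ sumNeed s.toList := by unfold sumNeed; omega
    have hinv := fold_inv s.toList hsum s.toList.length le_rfl
    rw [List.take_length] at hinv
    obtain ⟨lo, h1, h2, h3, hng, hA1, hI, hA2⟩ := hinv
    obtain ⟨i, hi, hiL, g⟩ := ok_mval s.toList
    have hub := hA1 i (i + mval s.toList) (by omega) (by omega) g
    have hmn := mval_le_len s.toList
    rcases hA2 with hbn | ⟨l, h, hlh, hhn, hg, he⟩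
    · omega
    · have hok : okP s.toList (h - l) := ⟨l, by omega, by omega, by
        have hE : l + (h - l) = h := by omega
        rw [hE]; exact hg⟩
      have := mval_le hok
      omega



-- ===== VERDICT (by name: the statement is the Claim_ definition above) =====
theorem balancedString_ming_spec : Claim_equal_balancedString_ming := by
  intro s _
  unfold Spec_balancedString_ming
  rw [A_eq, B_eq]
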